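-- pv_equiv track=rewrite | github.com/bestrvdzz111/COMP1531-1 | lab03-starter/duplicate.py | singlify
-- ===== SOURCE A (Python) =====
-- def singlify(s):
--     word_list = s.split()
--     word_list_new = []
--     words={}
--
--     for word in word_list:
--         words[word.lower()]=1
--     for word in word_list:
--         if words[word.lower()]==1:
--             word_list_new.append(word)
--             words[word.lower()]=0
--     # sort the list
--     word_list_new.sort(key=str.lower)
--
--     return ' '.join(word_list_new)
-- ===== SOURCE B (Python) =====
-- def singlify(s):
--     # Sort-then-scan: stably sort all words case-insensitively, then keep the
--     # first word of each run of equal lowercased words (no dict needed; stability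
--     # makes that first word the earliest occurrence in s).
--     out = []
--     for w in sorted(s.split(), key=str.lower):
--         if not out or out[-1].lower() != w.lower():
--             out.append(w)
--     return ' '.join(out)
-- ===== Notes on version B (the rewrite author's own statement) =====
-- stated objective: alternative
-- what changed: Replaces A's dict-based dedup (flag dict pass, filtered rebuild pass, then sort) by sort-then-scan: stably sort all words case-insensitively first, then keep the first word of each run of equal lowercased words; stability makes that first word the earliest occurrence, so no dict is needed.
import Mathlib
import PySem

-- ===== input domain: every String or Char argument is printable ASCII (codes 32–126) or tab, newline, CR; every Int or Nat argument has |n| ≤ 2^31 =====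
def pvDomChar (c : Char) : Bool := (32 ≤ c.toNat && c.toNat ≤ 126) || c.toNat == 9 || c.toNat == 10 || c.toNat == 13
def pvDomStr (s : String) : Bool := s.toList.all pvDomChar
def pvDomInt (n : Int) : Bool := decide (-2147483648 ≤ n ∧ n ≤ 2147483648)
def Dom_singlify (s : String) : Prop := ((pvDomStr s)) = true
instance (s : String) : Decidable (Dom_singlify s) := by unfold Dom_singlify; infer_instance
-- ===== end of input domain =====

-- B replaces A's dict-based dedup (flag dict + filtered rebuild + sort) by sort-then-scan:
-- sort all words stably by lowercase, then keep the first word of each equal-lowercase run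
-- (objective: alternative algorithm, no dict).

-- ===== PORT A =====
def singlify (s : String) : String :=
  let wordList := PySem.Str.split₀ s
  let words : PySem.Dict String Int :=
    wordList.foldl (fun d w => d.insert (PySem.Str.lower w) 1) PySem.Dict.empty
  let st :=
    wordList.foldl
      (fun (st : List String × PySem.Dict String Int) w =>
        if st.2.get? (PySem.Str.lower w) == some 1 then
          (st.1 ++ [w], st.2.insert (PySem.Str.lower w) 0)
        else st)
      ([], words)
  PySem.Str.join " " (PySem.List.sorted st.1 PySem.Str.lower)

-- ===== PORT B =====
def singlify_alt (s : String) : String :=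
  let out :=
    (PySem.List.sorted (PySem.Str.split₀ s) PySem.Str.lower).foldl
      (fun (out : List String) w =>
        match out.getLast? with
        | none => out ++ [w]                      -- `not out`
        | some p =>                               -- `out[-1].lower() != w.lower()`
          if PySem.Str.lower p ≠ PySem.Str.lower w then out ++ [w] else out)
      []
  PySem.Str.join " " out

-- ===== PRECONDITION & SPEC =====
def Spec_singlify (s : String) (out : String) : Prop := out = singlify_alt s
instance (s : String) (out : String) : Decidable (Spec_singlify s out) := by unfold Spec_singlify; infer_instance

-- ===== CLAIM (what is proved, stated in full; the proofs are below) =====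
def Claim_equal_singlify : Prop := ∀ (s : String), Dom_singlify s → Spec_singlify s (singlify s)

-- ===== LEMMAS AND PROOFS =====

-- Proof-only helpers: insertion step of the stable sort; keep-scan; adjacent dedup;
-- dedup-by-seen-keys (the first-occurrence representatives).
def pvIns (x : String) (acc : List String) : List String :=
  PySem.List.insertBy (fun a b => decide (PySem.Str.lower a < PySem.Str.lower b)) x acc

def pvKeep (kp : String) : List String → List String
  | [] => []
  | w :: t => if PySem.Str.lower w = kp then pvKeep kp t else w :: pvKeep (PySem.Str.lower w) t

def pvDD : List String → List String
  | [] => []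
  | a :: t => a :: pvKeep (PySem.Str.lower a) t

def pvDdk : List String → List String → List String
  | [], _ => []
  | w :: ws, seen =>
    if PySem.Str.lower w ∈ seen then pvDdk ws seen
    else w :: pvDdk ws (PySem.Str.lower w :: seen)

-- A's first loop: every word of the list ends up flagged 1.
lemma flag_dict_get (ws : List String) (d : PySem.Dict String Int) (k : String) :
    (ws.foldl (fun d w => d.insert (PySem.Str.lower w) 1) d).get? k =
      if k ∈ ws.map PySem.Str.lower then some 1 else d.get? k := by
  induction ws generalizing d with
  | nil => simp
  | cons w ws ih =>
    simp only [List.foldl_cons, ih, List.map_cons, List.mem_cons]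
    by_cases hk : k = PySem.Str.lower w
    · subst hk
      by_cases hmem : PySem.Str.lower w ∈ ws.map PySem.Str.lower <;>
        simp [hmem, PySem.Dict.get?_insert_self]
    · by_cases hmem : k ∈ ws.map PySem.Str.lower <;>
        simp [hmem, hk, PySem.Dict.get?_insert_of_ne _ _ hk]

-- A's second loop computes the first-occurrence representatives pvDdk.
lemma loopA (ws : List String) (acc : List String) (d : PySem.Dict String Int)
    (seen : List String)
    (h : ∀ w ∈ ws, d.get? (PySem.Str.lower w) =
          some (if PySem.Str.lower w ∈ seen then 0 else 1)) :
    (ws.foldl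
      (fun (st : List String × PySem.Dict String Int) w =>
        if st.2.get? (PySem.Str.lower w) == some 1 then
          (st.1 ++ [w], st.2.insert (PySem.Str.lower w) 0)
        else st)
      (acc, d)).1 = acc ++ pvDdk ws seen := by
  induction ws generalizing acc d seen with
  | nil => simp [pvDdk]
  | cons w ws ih =>
    have hw := h w List.mem_cons_self
    by_cases hc : PySem.Str.lower w ∈ seen
    · simp only [hc, if_true] at hw
      simp only [List.foldl_cons, hw, pvDdk, hc, if_true]
      have : ((some (0 : Int)) == some 1) = false := by decide
      rw [this]
      simp only [Bool.false_eq_true, if_false]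
      exact ih acc d seen (fun w' hw' => h w' (List.mem_cons_of_mem _ hw'))
    · simp only [hc, if_false] at hw
      simp only [List.foldl_cons, hw, pvDdk, hc, if_false]
      have : ((some (1 : Int)) == some 1) = true := by decide
      rw [this]
      simp only [if_true]
      rw [ih (acc ++ [w]) _ (PySem.Str.lower w :: seen), List.append_assoc]
      · simp
      · intro w' hw'
        by_cases hk : PySem.Str.lower w' = PySem.Str.lower w
        · rw [hk]
          simp [PySem.Dict.get?_insert_self]
        · rw [PySem.Dict.get?_insert_of_ne _ _ hk, h w' (List.mem_cons_of_mem _ hw')]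
          simp [List.mem_cons, hk]

-- B's loop (compare to last kept) is the keep-scan.
lemma loopB_keep (ws out : List String) (p : String) (hp : out.getLast? = some p) :
    ws.foldl
      (fun (out : List String) w =>
        match out.getLast? with
        | none => out ++ [w]
        | some p =>
          if PySem.Str.lower p ≠ PySem.Str.lower w then out ++ [w] else out)
      out = out ++ pvKeep (PySem.Str.lower p) ws := by
  induction ws generalizing out p with
  | nil => simp [pvKeep]
  | cons w ws ih =>
    simp only [List.foldl_cons, hp, pvKeep]
    by_cases hk : PySem.Str.lower w = PySem.Str.lower p
    · simp only [hk, if_true, ne_eq, not_true_eq_false, if_false]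
      exact ih out p hp
    · have hk' : PySem.Str.lower p ≠ PySem.Str.lower w := fun h => hk h.symm
      simp only [hk, if_false, ne_eq, hk', not_false_eq_true, if_true]
      rw [ih (out ++ [w]) w (by simp), List.append_assoc]
      simp

lemma loopB_dd (ws : List String) :
    ws.foldl
      (fun (out : List String) w =>
        match out.getLast? with
        | none => out ++ [w]
        | some p =>
          if PySem.Str.lower p ≠ PySem.Str.lower w then out ++ [w] else out)
      [] = pvDD ws := by
  cases ws with
  | nil => rfl
  | cons w ws =>
    simp only [List.foldl_cons, List.getLast?_nil, List.nil_append, pvDD]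
    exact loopB_keep ws [w] w rfl

-- pvIns preserves sortedness by the lowercase key.
lemma pvIns_pairwise (x : String) (acc : List String)
    (h : acc.Pairwise (fun a b => PySem.Str.lower a ≤ PySem.Str.lower b)) :
    (pvIns x acc).Pairwise (fun a b => PySem.Str.lower a ≤ PySem.Str.lower b) := by
  induction acc with
  | nil => simp [pvIns, PySem.List.insertBy]
  | cons a t ih =>
    rw [List.pairwise_cons] at h
    simp only [pvIns, PySem.List.insertBy]
    by_cases hlt : PySem.Str.lower x < PySem.Str.lower a
    · simp only [hlt, decide_true, if_true]
      refine List.pairwise_cons.2 ⟨?_, List.pairwise_cons.2 h⟩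
      intro y hy
      rcases List.mem_cons.1 hy with rfl | hy
      · exact le_of_lt hlt
      · exact le_trans (le_of_lt hlt) (h.1 y hy)
    · simp only [hlt, decide_false, Bool.false_eq_true, if_false]
      refine List.pairwise_cons.2 ⟨?_, ih h.2⟩
      intro y hy
      rcases (PySem.List.mem_insertBy _ x y t).1 hy with rfl | hy
      · exact le_of_not_gt hlt
      · exact h.1 y hy

lemma mem_map_pvIns (x y : String) (acc : List String) :
    (y ∈ (pvIns x acc).map PySem.Str.lower) ↔
      (y = PySem.Str.lower x ∨ y ∈ acc.map PySem.Str.lower) := by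
  simp only [List.mem_map, pvIns]
  constructor
  · rintro ⟨z, hz, rfl⟩
    rcases (PySem.List.mem_insertBy _ x z acc).1 hz with rfl | hz
    · exact Or.inl rfl
    · exact Or.inr ⟨z, hz, rfl⟩
  · rintro (rfl | ⟨z, hz, rfl⟩)
    · exact ⟨x, (PySem.List.mem_insertBy _ x x acc).2 (Or.inl rfl), rfl⟩
    · exact ⟨z, (PySem.List.mem_insertBy _ x z acc).2 (Or.inr hz), rfl⟩

-- Inserting a word whose key already occurs does not change the keep-scan.
lemma keep_ins_mem (x : String) (t : List String) (kp : String)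
    (hs : t.Pairwise (fun a b => PySem.Str.lower a ≤ PySem.Str.lower b))
    (hp : ∀ w ∈ t, kp ≤ PySem.Str.lower w)
    (hmem : PySem.Str.lower x = kp ∨ PySem.Str.lower x ∈ t.map PySem.Str.lower) :
    pvKeep kp (pvIns x t) = pvKeep kp t := by
  induction t generalizing kp with
  | nil =>
    rcases hmem with hmem | hmem
    · simp [pvIns, PySem.List.insertBy, pvKeep, hmem]
    · simp at hmem
  | cons w t ih =>
    rw [List.pairwise_cons] at hs
    simp only [pvIns, PySem.List.insertBy]
    by_cases hlt : PySem.Str.lower x < PySem.Str.lower w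
    · have hxkp : PySem.Str.lower x = kp := by
        rcases hmem with h | h
        · exact h
        · exfalso
          simp only [List.map_cons, List.mem_cons, List.mem_map] at h
          rcases h with h | ⟨z, hz, hzx⟩
          · exact absurd h (ne_of_lt hlt)
          · exact absurd (hzx ▸ hs.1 z hz) (not_le.mpr hlt)
      simp only [hlt, decide_true, if_true]
      show pvKeep kp (x :: w :: t) = pvKeep kp (w :: t)
      simp only [pvKeep, hxkp, if_true]
    · simp only [hlt, decide_false, Bool.false_eq_true, if_false, pvKeep]
      by_cases hw : PySem.Str.lower w = kp
      · simp only [hw, if_true]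
        exact ih kp hs.2 (fun z hz => hw ▸ hs.1 z hz)
          (by
            rcases hmem with h | h
            · exact Or.inl h
            · simp only [List.map_cons, List.mem_cons] at h
              rcases h with h | h
              · exact Or.inl (h.trans hw)
              · exact Or.inr h)
      · simp only [hw, if_false]
        rw [show PySem.List.insertBy (fun a b => decide (PySem.Str.lower a < PySem.Str.lower b)) x t = pvIns x t from rfl]
        rw [ih (PySem.Str.lower w) hs.2 hs.1
          (by
            rcases hmem with h | h
            · exfalso
              have h1 : kp ≤ PySem.Str.lower w := hp w List.mem_cons_self
              have h2 : PySem.Str.lower w ≤ PySem.Str.lower x := le_of_not_gt hlt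
              exact hw (le_antisymm h1 (h ▸ h2)).symm
            · simp only [List.map_cons, List.mem_cons] at h
              rcases h with h | h
              · exact Or.inl h
              · exact Or.inr h)]

-- Inserting a word with a fresh key commutes with the keep-scan.
lemma keep_ins_fresh (x : String) (t : List String) (kp : String)
    (hs : t.Pairwise (fun a b => PySem.Str.lower a ≤ PySem.Str.lower b))
    (hp : ∀ w ∈ t, kp ≤ PySem.Str.lower w)
    (hkp : kp ≤ PySem.Str.lower x) (hne : PySem.Str.lower x ≠ kp)
    (hmem : PySem.Str.lower x ∉ t.map PySem.Str.lower) :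
    pvKeep kp (pvIns x t) = pvIns x (pvKeep kp t) := by
  induction t generalizing kp with
  | nil => simp [pvIns, PySem.List.insertBy, pvKeep, hne]
  | cons w t ih =>
    rw [List.pairwise_cons] at hs
    simp only [List.map_cons, List.mem_cons, not_or] at hmem
    simp only [pvIns, PySem.List.insertBy]
    by_cases hlt : PySem.Str.lower x < PySem.Str.lower w
    · have hwkp : PySem.Str.lower w ≠ kp := by
        intro h
        exact absurd (h ▸ hp w List.mem_cons_self)
          (not_le.mpr (lt_of_le_of_lt (lt_of_le_of_ne hkp (Ne.symm hne)).le hlt))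
      have hwx : PySem.Str.lower w ≠ PySem.Str.lower x := fun h => hmem.1 h.symm
      simp only [hlt, decide_true, if_true]
      show pvKeep kp (x :: w :: t) = pvIns x (pvKeep kp (w :: t))
      simp only [pvKeep, hne, if_false, hwkp, hwx]
      simp only [pvIns, PySem.List.insertBy, hlt, decide_true, if_true]
    · simp only [hlt, decide_false, Bool.false_eq_true, if_false, pvKeep]
      by_cases hw : PySem.Str.lower w = kp
      · simp only [hw, if_true]
        exact ih kp hs.2 (fun z hz => hw ▸ hs.1 z hz) hkp hne hmem.2
      · simp only [hw, if_false]
        rw [show PySem.List.insertBy (fun a b => decide (PySem.Str.lower a < PySem.Str.lower b)) x t = pvIns x t from rfl]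
        rw [ih (PySem.Str.lower w) hs.2 hs.1 (le_of_not_gt hlt)
          (fun h => hmem.1 h) hmem.2]
        simp only [pvIns, PySem.List.insertBy, hlt, decide_false, Bool.false_eq_true, if_false]

-- Adjacent dedup absorbs an insert with an already-present key …
lemma dd_ins_mem (x : String) (acc : List String)
    (hs : acc.Pairwise (fun a b => PySem.Str.lower a ≤ PySem.Str.lower b))
    (hmem : PySem.Str.lower x ∈ acc.map PySem.Str.lower) :
    pvDD (pvIns x acc) = pvDD acc := by
  cases acc with
  | nil => simp at hmem
  | cons a t =>
    rw [List.pairwise_cons] at hs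
    simp only [pvIns, PySem.List.insertBy]
    by_cases hlt : PySem.Str.lower x < PySem.Str.lower a
    · exfalso
      simp only [List.map_cons, List.mem_cons, List.mem_map] at hmem
      rcases hmem with h | ⟨z, hz, hzx⟩
      · exact absurd h (ne_of_lt hlt)
      · exact absurd (hzx ▸ hs.1 z hz) (not_le.mpr hlt)
    · simp only [hlt, decide_false, Bool.false_eq_true, if_false, pvDD]
      rw [show PySem.List.insertBy (fun a b => decide (PySem.Str.lower a < PySem.Str.lower b)) x t = pvIns x t from rfl]
      rw [keep_ins_mem x t (PySem.Str.lower a) hs.2 hs.1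
        (by
          simp only [List.map_cons, List.mem_cons] at hmem
          exact hmem)]

-- … and commutes with an insert whose key is fresh.
lemma dd_ins_fresh (x : String) (acc : List String)
    (hs : acc.Pairwise (fun a b => PySem.Str.lower a ≤ PySem.Str.lower b))
    (hmem : PySem.Str.lower x ∉ acc.map PySem.Str.lower) :
    pvDD (pvIns x acc) = pvIns x (pvDD acc) := by
  cases acc with
  | nil => rfl
  | cons a t =>
    rw [List.pairwise_cons] at hs
    simp only [List.map_cons, List.mem_cons, not_or] at hmem
    simp only [pvIns, PySem.List.insertBy]
    by_cases hlt : PySem.Str.lower x < PySem.Str.lower a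
    · simp only [hlt, decide_true, if_true, pvDD, pvKeep]
      have hne : PySem.Str.lower a ≠ PySem.Str.lower x := fun h => hmem.1 h.symm
      simp only [hne, if_false]
      simp only [PySem.List.insertBy, hlt, decide_true, if_true]
    · simp only [hlt, decide_false, Bool.false_eq_true, if_false, pvDD]
      rw [show PySem.List.insertBy (fun a b => decide (PySem.Str.lower a < PySem.Str.lower b)) x t = pvIns x t from rfl]
      rw [keep_ins_fresh x t (PySem.Str.lower a) hs.2 hs.1 (le_of_not_gt hlt) hmem.1 hmem.2]
      simp only [pvIns, PySem.List.insertBy, hlt, decide_false, Bool.false_eq_true, if_false]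

-- Main commutation: adjacent dedup of the insertion sort = insertion sort of the
-- first-occurrence representatives.
lemma dd_foldl_ins (ws : List String) (acc seen : List String)
    (hs : acc.Pairwise (fun a b => PySem.Str.lower a ≤ PySem.Str.lower b))
    (hseen : ∀ z, z ∈ seen ↔ z ∈ acc.map PySem.Str.lower) :
    pvDD (ws.foldl (fun acc x => pvIns x acc) acc) =
      (pvDdk ws seen).foldl (fun acc x => pvIns x acc) (pvDD acc) := by
  induction ws generalizing acc seen with
  | nil => simp [pvDdk]
  | cons w ws ih =>
    simp only [List.foldl_cons, pvDdk]
    by_cases hc : PySem.Str.lower w ∈ seen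
    · have hacc : PySem.Str.lower w ∈ acc.map PySem.Str.lower := (hseen _).1 hc
      simp only [hc, if_true]
      rw [ih (pvIns w acc) seen (pvIns_pairwise w acc hs)
        (fun z => by rw [hseen z, mem_map_pvIns]
                     exact ⟨Or.inr, fun h => h.elim (fun h => h ▸ hacc) id⟩),
        dd_ins_mem w acc hs hacc]
    · have hacc : PySem.Str.lower w ∉ acc.map PySem.Str.lower :=
        fun h => hc ((hseen _).2 h)
      simp only [hc, if_false, List.foldl_cons]
      rw [ih (pvIns w acc) (PySem.Str.lower w :: seen) (pvIns_pairwise w acc hs)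
        (fun z => by rw [List.mem_cons, hseen z, mem_map_pvIns]),
        dd_ins_fresh w acc hs hacc]

-- ===== VERDICT (by name: the statement is the Claim_ definition above) =====
theorem singlify_spec : Claim_equal_singlify := by
  intro s _
  show singlify s = singlify_alt s
  unfold singlify singlify_alt
  simp only []
  congr 1
  rw [loopB_dd, loopA (PySem.Str.split₀ s) [] _ []
    (fun w hw => by
      rw [flag_dict_get]
      have : PySem.Str.lower w ∈ (PySem.Str.split₀ s).map PySem.Str.lower :=
        List.mem_map_of_mem hw
      simp [this]),
    List.nil_append,
    PySem.List.sorted_eq_foldl_insertBy (PySem.Str.split₀ s) PySem.Str.lower,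
    PySem.List.sorted_eq_foldl_insertBy (pvDdk (PySem.Str.split₀ s) []) PySem.Str.lower]
  exact (dd_foldl_ins (PySem.Str.split₀ s) [] [] (by simp) (by simp)).symm
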